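-- pv_equiv track=rewrite | github.com/linhdvu14/cp-sols | sols/AtCoder/abc242/E_x.py | solve
-- ===== SOURCE A (Python) =====
-- MOD = 998244353
--
-- def solve(N, S):
--     S = [ord(c) - ord('A') for c in S]
--     res = 0
--
--     # X[:i] == S[:i], X[i] < S[i]
--     for i in range(N//2):
--         rem = (N + 1) // 2 - i - 1
--         res = (res + S[i] * pow(26, rem, MOD)) % MOD
--
--     if N % 2 == 1: res += S[N//2]
--     if S[:N//2][::-1] <= S[-(N//2):]: res += 1
--
--     return res % MOD
-- ===== SOURCE B (Python) =====
-- MOD = 998244353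
--
-- def solve(N, S):
--     # While-loop Horner scan over the first ceil(N/2) characters (bound 2*i < N),
--     # replacing A's per-index modular exponentiation and its separate middle-digit step.
--     res = 0
--     i = 0
--     while 2 * i < N:
--         res = (res * 26 + ord(S[i]) - ord('A')) % MOD
--         i += 1
--     if S[:N // 2][::-1] <= S[-(N // 2):]:
--         res += 1
--     return res % MOD
-- ===== Notes on version B (the rewrite author's own statement) =====
-- stated objective: faster
-- what changed: Replaces A's powers-of-26 representation (a pow(26, rem, MOD) modular exponentiation recomputed in every iteration over range(N//2), plus a separate odd-N middle-character addition) by a while-loop Horner multiply-accumulate scan (while 2*i < N) over the first ceil(N/2) characters, which absorbs the middle digit at exponent 0; the verbatim tie-break and final mod are kept.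
-- intended difference: For negative odd N, A's middle-character addition S[N//2] wraps around to a character near the end of S and adds its value; B's Horner loop is empty there and adds nothing, which is the intended degenerate behaviour since a negative length has no middle character (they agree when that wrapped character happens to be 'A'). — e.g. on solve(-1, "B"): A returns 2, B returns 1
import Mathlib
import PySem

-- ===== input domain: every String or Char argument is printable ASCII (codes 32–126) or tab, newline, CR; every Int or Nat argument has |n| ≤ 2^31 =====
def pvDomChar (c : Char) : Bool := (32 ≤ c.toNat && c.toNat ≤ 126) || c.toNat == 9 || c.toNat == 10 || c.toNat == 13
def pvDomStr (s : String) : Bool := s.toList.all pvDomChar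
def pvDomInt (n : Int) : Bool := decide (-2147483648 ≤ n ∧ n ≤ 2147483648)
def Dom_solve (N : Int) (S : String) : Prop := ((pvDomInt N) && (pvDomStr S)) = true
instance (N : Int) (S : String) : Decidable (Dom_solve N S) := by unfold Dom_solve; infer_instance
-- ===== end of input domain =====

-- B replaces A's per-character modular exponentiation (pow(26, rem, MOD)) and separate
-- odd-N middle-character step by a single while-loop Horner multiply-accumulate scan (measured faster).


def pyMOD : Int := 998244353

-- ===== PORT A =====
-- Python's `xs <= ys` lexicographic comparison on the int lists A builds, ported by hand (exact).
def pyLexLe {α : Type} (lt eq : α → α → Bool) : List α → List α → Bool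
  | [], _ => true
  | _ :: _, [] => false
  | x :: xs, y :: ys => if lt x y then true else if eq x y then pyLexLe lt eq xs ys else false

def solve (N : Int) (S : String) : Int :=
  let Sv : List Int := S.toList.map (fun c => (c.toNat : Int) - 65)
  let res : Int := (PySem.List.pyRange 0 (PySem.Int.floordiv N 2) 1).foldl
    (fun res i =>
      let rem : Int := PySem.Int.floordiv (N + 1) 2 - i - 1
      -- pow(26, rem, MOD): whenever the Python loop body runs, rem ≥ 0, so the Nat exponent is exact
      PySem.Int.mod (res + PySem.List.pyGetD Sv i 0 * PySem.Int.powMod 26 rem.toNat pyMOD) pyMOD) 0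
  let res : Int := if PySem.Int.mod N 2 = 1 then res + PySem.List.pyGetD Sv (PySem.Int.floordiv N 2) 0
                   else res
  let res : Int :=
    if pyLexLe (fun a b : Int => decide (a < b)) (fun a b => decide (a = b))
        ((PySem.List.slice? (PySem.List.slice Sv none (some (PySem.Int.floordiv N 2))) none none (-1)).getD [])
        (PySem.List.slice Sv (some (-(PySem.Int.floordiv N 2))) none)
    then res + 1 else res
  PySem.Int.mod res pyMOD

-- ===== PORT B =====
-- the `while 2 * i < N:` Horner loop of Source B (state = (i, res), one recursive call per
-- iteration; the Nat fuel only bounds the trip count — N.toNat suffices — and never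
-- changes the result, it just makes the recursion structural)
def altLoop (N : Int) (cs : List Char) : Nat → Int → Int → Int
  | fuel + 1, i, res =>
    if 2 * i < N then
      altLoop N cs fuel (i + 1)
        (PySem.Int.mod (res * 26 + ((PySem.List.pyGetD cs i 'A').toNat : Int) - 65) pyMOD)
    else res
  | 0, _, res => res

-- Python's `s <= t` on strings, ported by hand over the character lists (exact)
def lexLeCh : List Char → List Char → Bool
  | [], _ => true
  | _ :: _, [] => false
  | x :: xs, y :: ys => if x = y then lexLeCh xs ys else decide (x < y)

def solve_alt (N : Int) (S : String) : Int :=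
  let res : Int := altLoop N S.toList N.toNat 0 0
  let res : Int :=
    if lexLeCh
        ((PySem.List.slice? (PySem.List.slice S.toList none (some (PySem.Int.floordiv N 2))) none none (-1)).getD [])
        (PySem.List.slice S.toList (some (-(PySem.Int.floordiv N 2))) none)
    then res + 1 else res
  PySem.Int.mod res pyMOD

-- ===== PRECONDITION & SPEC =====
-- Pre_ excludes exactly the inputs where A raises IndexError: for N ≥ 0 the loop/middle
-- accesses need ceil(N/2) ≤ len(S); for negative odd N the wrapped middle access S[N//2]
-- needs -(N//2) ≤ len(S).
def Pre_solve (N : Int) (S : String) : Prop :=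
  (0 ≤ N → N ≤ 2 * (S.toList.length : Int)) ∧
  (N < 0 ∧ N % 2 = 1 → 1 - N ≤ 2 * (S.toList.length : Int))
instance (N : Int) (S : String) : Decidable (Pre_solve N S) := by unfold Pre_solve; infer_instance
def pvWitness_solve : Int × String := (3, "ABC")

-- For negative odd N, A's middle addition S[N//2] wraps around to a character near the end of S
-- and adds its value; B's Horner loop is empty there and adds nothing, which is the intended
-- degenerate behaviour since a negative length has no middle character (they agree when the
-- wrapped character is 'A').
def D_solve (N : Int) (S : String) : Prop :=
  N < 0 ∧ N % 2 = 1 ∧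
    PySem.List.pyGet? S.toList ((N - 1) / 2) ≠ some 'A'
instance (N : Int) (S : String) : Decidable (D_solve N S) := by unfold D_solve; infer_instance

def Spec_solve (N : Int) (S : String) (out : Int) : Prop := ¬ D_solve N S → out = solve_alt N S
instance (N : Int) (S : String) (out : Int) : Decidable (Spec_solve N S out) := by unfold Spec_solve; infer_instance

def pvDiffWitness_solve : Int × String := (-1, "B")
def pvDiffWitnessOut_solve : Int × Int := (2, 1)

-- ===== CLAIM (what is proved, stated in full; the proofs are below) =====
def Claim_unchanged_solve : Prop := ∀ (N : Int) (S : String), Dom_solve N S → Pre_solve N S → Spec_solve N S (solve N S)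
def Claim_changed_solve : Prop := Dom_solve (pvDiffWitness_solve.1) (pvDiffWitness_solve.2) ∧ Pre_solve (pvDiffWitness_solve.1) (pvDiffWitness_solve.2) ∧ D_solve (pvDiffWitness_solve.1) (pvDiffWitness_solve.2) ∧ solve (pvDiffWitness_solve.1) (pvDiffWitness_solve.2) = pvDiffWitnessOut_solve.1 ∧ solve_alt (pvDiffWitness_solve.1) (pvDiffWitness_solve.2) = pvDiffWitnessOut_solve.2 ∧ pvDiffWitnessOut_solve.1 ≠ pvDiffWitnessOut_solve.2
def Claim_exact_solve : Prop := ∀ (N : Int) (S : String), Dom_solve N S → Pre_solve N S → D_solve N S → solve N S ≠ solve_alt N S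

-- ===== LEMMAS AND PROOFS =====

theorem pyGet?_map {a b : Type} (f : a → b) (xs : List a) (i : Int) :
    PySem.List.pyGet? (xs.map f) i = (PySem.List.pyGet? xs i).map f := by
  simp only [PySem.List.pyGet?, List.length_map]
  cases h : PySem.List.pyIdx? xs.length i <;> simp [List.getElem?_map]

theorem slice_map {a b : Type} (f : a → b) (xs : List a) (a? b? : Option Int) :
    PySem.List.slice (xs.map f) a? b? = (PySem.List.slice xs a? b?).map f := by
  cases a? <;> cases b? <;>
    simp [PySem.List.slice, List.map_drop, List.map_take, List.length_map]

theorem pyMOD_pos : (0:Int) < pyMOD := by norm_num [pyMOD]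

theorem mod_pyMOD (a : Int) : PySem.Int.mod a pyMOD = a % 998244353 := by
  have h := PySem.Int.mod_eq_emod_of_pos (a := a) (b := pyMOD) pyMOD_pos
  simp only [pyMOD] at h
  exact h

theorem char_lt_iff (x y : Char) :
    ((x.toNat : Int) - 65 < (y.toNat : Int) - 65) ↔ x < y := by
  rw [Char.lt_def, UInt32.lt_iff_toNat_lt]
  show _ ↔ x.toNat < y.toNat
  omega

theorem char_eq_iff (x y : Char) :
    ((x.toNat : Int) - 65 = (y.toNat : Int) - 65) ↔ x = y := by
  rw [← (eq_iff_eq_of_cmp_eq_cmp rfl : x.toNat = y.toNat ↔ x = y)]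
  omega

theorem pyLexLe_map (xs ys : List Char) :
    pyLexLe (fun a b : Int => decide (a < b)) (fun a b => decide (a = b))
      (xs.map (fun c => (c.toNat : Int) - 65)) (ys.map (fun c => (c.toNat : Int) - 65))
    = lexLeCh xs ys := by
  induction xs generalizing ys with
  | nil => cases ys <;> rfl
  | cons x xs ih =>
    cases ys with
    | nil => rfl
    | cons y ys =>
      simp only [List.map_cons, pyLexLe, lexLeCh, decide_eq_true_eq, char_lt_iff, char_eq_iff, ih]
      by_cases hxy : x = y
      · simp [hxy]
      · by_cases hlt : x < y
        · simp [hxy, hlt]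
        · simp [hxy, hlt]

theorem tie_congr (cs : List Char) (L : Int) :
    pyLexLe (fun a b : Int => decide (a < b)) (fun a b => decide (a = b))
      ((PySem.List.slice? (PySem.List.slice (cs.map (fun c => (c.toNat : Int) - 65)) none (some L)) none none (-1)).getD [])
      (PySem.List.slice (cs.map (fun c => (c.toNat : Int) - 65)) (some (-L)) none)
    = lexLeCh
      ((PySem.List.slice? (PySem.List.slice cs none (some L)) none none (-1)).getD [])
      (PySem.List.slice cs (some (-L)) none) := by
  rw [PySem.List.slice?_none_none_neg_one, PySem.List.slice?_none_none_neg_one,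
    Option.getD_some, Option.getD_some, slice_map, slice_map, ← List.map_reverse,
    pyLexLe_map]

theorem loopA (v : Nat → Int) (h : Nat) (j : Nat) :
    (List.range j).foldl
        (fun res k => (res + v k * ((26:Int) ^ (h - 1 - k) % 998244353)) % 998244353) 0
      = (∑ k ∈ Finset.range j, v k * (26:Int) ^ (h - 1 - k)) % 998244353 := by
  induction j with
  | zero => simp
  | succ j ih =>
    rw [List.range_succ, List.foldl_append, ih, Finset.sum_range_succ]
    simp only [List.foldl_cons, List.foldl_nil]
    have e1 : (∑ k ∈ Finset.range j, v k * (26:Int) ^ (h - 1 - k)) % 998244353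
        ≡ ∑ k ∈ Finset.range j, v k * (26:Int) ^ (h - 1 - k) [ZMOD 998244353] :=
      Int.emod_emod_of_dvd _ dvd_rfl
    have e2 : ((26:Int) ^ (h - 1 - j) % 998244353) ≡ (26:Int) ^ (h - 1 - j) [ZMOD 998244353] :=
      Int.emod_emod_of_dvd _ dvd_rfl
    exact e1.add (e2.mul_left (v j))

theorem loopB (v : Nat → Int) (j : Nat) :
    (List.range j).foldl (fun res k => (res * 26 + v k) % 998244353) 0
      = (∑ k ∈ Finset.range j, v k * (26:Int) ^ (j - 1 - k)) % 998244353 := by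
  induction j with
  | zero => simp
  | succ j ih =>
    rw [List.range_succ, List.foldl_append, ih]
    simp only [List.foldl_cons, List.foldl_nil, Nat.add_sub_cancel]
    have hsum : ∑ k ∈ Finset.range (j+1), v k * (26:Int) ^ (j - k)
        = (∑ k ∈ Finset.range j, v k * (26:Int) ^ (j - 1 - k)) * 26 + v j := by
      rw [Finset.sum_range_succ, Nat.sub_self, pow_zero, mul_one, Finset.sum_mul]
      congr 1
      refine Finset.sum_congr rfl fun k hk => ?_
      rw [Finset.mem_range] at hk
      rw [mul_assoc, ← pow_succ]
      congr 2
      omega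
    rw [hsum]
    have e1 : (∑ k ∈ Finset.range j, v k * (26:Int) ^ (j - 1 - k)) % 998244353
        ≡ ∑ k ∈ Finset.range j, v k * (26:Int) ^ (j - 1 - k) [ZMOD 998244353] :=
      Int.emod_emod_of_dvd _ dvd_rfl
    exact (e1.mul_right 26).add_right (v j)

-- B's while-loop, unrolled to a foldl over the index range it visits (for N ≥ 0)
theorem altLoop_foldl (N : Int) (cs : List Char) (H' : Nat)
    (hH : (H' : Int) = PySem.Int.floordiv (N + 1) 2) :
    ∀ (d j fuel : Nat) (res : Int), j + d = H' → d ≤ fuel →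
      altLoop N cs fuel (j : Int) res
        = (List.range' j d).foldl
            (fun (res : Int) (k : Nat) =>
              PySem.Int.mod (res * 26 + ((PySem.List.pyGetD cs ((k : Nat) : Int) 'A').toNat : Int) - 65) pyMOD)
            res := by
  have hH2 := PySem.Int.floordiv_mul_add_mod (N+1) 2
  have hHm0 := PySem.Int.mod_nonneg (N+1) (by norm_num : (0:Int) < 2)
  have hHm1 := PySem.Int.mod_lt (N+1) (by norm_num : (0:Int) < 2)
  intro d
  induction d with
  | zero =>
    intro j fuel res hj hf
    cases fuel with
    | zero => rfl
    | succ f =>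
      rw [altLoop]
      have : ¬ (2 * (j : Int) < N) := by omega
      simp [this]
  | succ d ih =>
    intro j fuel res hj hf
    cases fuel with
    | zero => omega
    | succ f =>
      rw [altLoop]
      have hlt : 2 * (j : Int) < N := by omega
      rw [if_pos hlt, List.range'_succ, List.foldl_cons]
      have := ih (j + 1) f (PySem.Int.mod (res * 26 + ((PySem.List.pyGetD cs (j : Int) 'A').toNat : Int) - 65) pyMOD) (by omega) (by omega)
      rw [← this]
      push_cast
      ring_nf

theorem solve_spec : Claim_unchanged_solve := by
  intro N S hDom hPre hD
  obtain ⟨hpre1, hpre2⟩ := hPre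
  show solve N S = solve_alt N S
  have hL2 := PySem.Int.floordiv_mul_add_mod N 2
  have hLm0 := PySem.Int.mod_nonneg N (by norm_num : (0:Int) < 2)
  have hLm1 := PySem.Int.mod_lt N (by norm_num : (0:Int) < 2)
  have hH2 := PySem.Int.floordiv_mul_add_mod (N+1) 2
  have hHm0 := PySem.Int.mod_nonneg (N+1) (by norm_num : (0:Int) < 2)
  have hHm1 := PySem.Int.mod_lt (N+1) (by norm_num : (0:Int) < 2)
  rcases lt_or_ge N 0 with hneg | hpos
  · -- negative N: A's loop range is empty, B's while-loop test fails at once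
    have hB0 : altLoop N S.toList N.toNat 0 0 = 0 := by
      have h0 : N.toNat = 0 := by omega
      rw [h0]; rfl
    simp only [solve, solve_alt,
      PySem.List.pyRange_one_eq_nil (by omega : PySem.Int.floordiv N 2 ≤ 0),
      List.foldl_nil, tie_congr, hB0]
    have hfl : PySem.Int.floordiv N 2 = N / 2 :=
      PySem.Int.floordiv_eq_ediv_of_pos (by norm_num)
    have hmd : PySem.Int.mod N 2 = N % 2 :=
      PySem.Int.mod_eq_emod_of_pos (by norm_num)
    by_cases hm : PySem.Int.mod N 2 = 1
    · have hm' : N % 2 = 1 := by rw [← hmd]; exact hm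
      have hidx : (N - 1) / 2 = N / 2 := by omega
      have hget : PySem.List.pyGet? S.toList (N / 2) = some 'A' := by
        by_contra hne
        exact hD ⟨hneg, hm', by rw [hidx]; exact hne⟩
      rw [hmd] at hm
      simp [hm, PySem.List.pyGetD, pyGet?_map, hget]
    · rw [hmd] at hm
      simp [hm]
  · -- nonnegative N
    have hL0 : 0 ≤ PySem.Int.floordiv N 2 := by omega
    have hH0 : 0 ≤ PySem.Int.floordiv (N + 1) 2 := by omega
    have hLN : PySem.Int.floordiv N 2 = ((PySem.Int.floordiv N 2).toNat : Int) :=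
      (Int.toNat_of_nonneg hL0).symm
    have hHN : PySem.Int.floordiv (N + 1) 2 = ((PySem.Int.floordiv (N + 1) 2).toNat : Int) :=
      (Int.toNat_of_nonneg hH0).symm
    set L' := (PySem.Int.floordiv N 2).toNat with hL'def
    set H' := (PySem.Int.floordiv (N + 1) 2).toNat with hH'def
    have hlen : H' ≤ S.toList.length := by
      have := hpre1 hpos
      omega
    have hv : ∀ k, k < H' →
        (S.toList.map (fun c => (c.toNat : Int) - 65)).getD k 0
          = ((S.toList.getD k 'A').toNat : Int) - 65 := by
      intro k hk
      have hk' : k < S.toList.length := by omega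
      simp [List.getD_eq_getElem?_getD, List.getElem?_map, List.getElem?_eq_getElem hk']
    have hBfold := altLoop_foldl N S.toList H' hHN.symm H' 0 N.toNat 0 (by omega) (by omega)
    rw [← List.range_eq_range'] at hBfold
    simp only [Nat.cast_zero] at hBfold
    simp only [solve, solve_alt, hLN, hHN, PySem.List.pyRange_zero_natCast,
      List.foldl_map, tie_congr, hBfold]
    rw [PySem.List.foldl_congr_mem (List.range L') _
      (fun res k => (res + (S.toList.map (fun c => (c.toNat : Int) - 65)).getD k 0 *
        ((26:Int) ^ (H' - 1 - k) % 998244353)) % 998244353) 0 ?hA,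
      PySem.List.foldl_congr_mem (List.range H') _
      (fun res k => (res * 26 + (S.toList.map (fun c => (c.toNat : Int) - 65)).getD k 0) % 998244353) 0 ?hB,
      loopA, loopB]
    case hA =>
      intro acc k hk
      rw [List.mem_range] at hk
      have hexp : (((H' : Nat) : Int) - (k : Int) - 1).toNat = H' - 1 - k := by omega
      simp only [PySem.List.pyGetD_natCast, PySem.Int.powMod, mod_pyMOD, hexp]
    case hB =>
      intro acc k hk
      rw [List.mem_range] at hk
      simp only [PySem.List.pyGetD_natCast, mod_pyMOD, hv k hk]
      congr 1
      ring
    -- now both sides are sums mod M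
    by_cases hm : PySem.Int.mod N 2 = 1
    · have hH'L' : H' = L' + 1 := by omega
      have hSB : (∑ k ∈ Finset.range H',
            (S.toList.map (fun c => (c.toNat : Int) - 65)).getD k 0 * (26:Int) ^ (H' - 1 - k))
          = (∑ k ∈ Finset.range L',
            (S.toList.map (fun c => (c.toNat : Int) - 65)).getD k 0 * (26:Int) ^ (H' - 1 - k))
            + (S.toList.map (fun c => (c.toNat : Int) - 65)).getD L' 0 := by
        rw [hH'L', Finset.sum_range_succ]
        simp
      rw [if_pos hm]
      simp only [PySem.List.pyGetD_natCast]
      rw [mod_pyMOD, mod_pyMOD, hSB]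
      split_ifs <;> omega
    · rw [if_neg hm]
      have hH'L' : H' = L' := by omega
      rw [hH'L']

theorem solve_tight : Claim_exact_solve := by
  intro N S hDom hPre hD
  obtain ⟨hneg, hm, hne⟩ := hD
  obtain ⟨hpre1, hpre2⟩ := hPre
  have hL2 := PySem.Int.floordiv_mul_add_mod N 2
  have hLm0 := PySem.Int.mod_nonneg N (by norm_num : (0:Int) < 2)
  have hLm1 := PySem.Int.mod_lt N (by norm_num : (0:Int) < 2)
  have hlen := hpre2 ⟨hneg, hm⟩
  have hmP : PySem.Int.mod N 2 = 1 := by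
    rw [PySem.Int.mod_eq_emod_of_pos (by norm_num : (0:Int) < 2)]; exact hm
  have hfd : PySem.Int.floordiv N 2 = (N - 1) / 2 := by
    rw [PySem.Int.floordiv_eq_ediv_of_pos (by norm_num : (0:Int) < 2)]; omega
  obtain ⟨c, hc⟩ : ∃ c, PySem.List.pyGet? S.toList ((N - 1) / 2) = some c := by
    cases h : PySem.List.pyGet? S.toList ((N - 1) / 2) with
    | none =>
      rw [PySem.List.pyGet?_eq_none_iff, PySem.Raise.InRange] at h
      exact absurd h (by push Not; omega)
    | some c => exact ⟨c, rfl⟩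
  have hcA : c ≠ 'A' := by
    rintro rfl
    exact hne hc
  have hc65 : c.toNat ≠ 65 := by
    intro h65
    exact hcA ((eq_iff_eq_of_cmp_eq_cmp rfl : c.toNat = ('A').toNat ↔ c = 'A').mp h65)
  have hdom : pvDomChar c = true := by
    have hmem := PySem.List.mem_of_pyGet?_eq_some S.toList hc
    have hstr : pvDomStr S = true := by
      unfold Dom_solve at hDom
      simp only [Bool.and_eq_true] at hDom
      exact hDom.2
    unfold pvDomStr at hstr
    rw [List.all_eq_true] at hstr
    exact hstr c hmem
  have hbounds : (32 ≤ c.toNat ∧ c.toNat ≤ 126) ∨ c.toNat = 9 ∨ c.toNat = 10 ∨ c.toNat = 13 := by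
    unfold pvDomChar at hdom
    simp only [Bool.or_eq_true, Bool.and_eq_true, decide_eq_true_eq, beq_iff_eq] at hdom
    tauto
  have hB0 : altLoop N S.toList N.toNat 0 0 = 0 := by
    have h0 : N.toNat = 0 := by omega
    rw [h0]; rfl
  simp only [solve, solve_alt,
    PySem.List.pyRange_one_eq_nil (by omega : (N - 1) / 2 ≤ 0),
    List.foldl_nil, tie_congr, hmP, if_true, hB0,
    PySem.List.pyGetD, pyGet?_map, hfd, hc, Option.map_some, Option.getD_some]
  rw [mod_pyMOD, mod_pyMOD]
  split_ifs <;> omega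

theorem solve_changed : Claim_changed_solve := by
  unfold Claim_changed_solve; decide
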